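-- pv_equiv track=rewrite | github.com/Learnline-AI/Learnline-RAG | dynamic_rag_system/holistic_rag_system.py | _concepts_related
-- ===== SOURCE A (Python) =====
-- def _concepts_related(concept1: str, concept2: str) -> bool:
--     """Check if two concepts are semantically related"""
--     # Simplified check - in production, use word embeddings or AI
--     c1_words = set(concept1.lower().split())
--     c2_words = set(concept2.lower().split())
--
--     # Check for common words
--     common = c1_words.intersection(c2_words)
--     if common:
--         return True
--
--     # Check for known relationships
--     related_terms = {
--         'force': {'push', 'pull', 'newton', 'dynamics'},
--         'motion': {'movement', 'velocity', 'speed', 'kinematic'},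
--         'energy': {'work', 'power', 'kinetic', 'potential'},
--         'light': {'optics', 'ray', 'reflection', 'refraction'},
--         'electricity': {'current', 'voltage', 'circuit', 'charge'},
--         'heat': {'temperature', 'thermal', 'calorie', 'conduction'}
--     }
--
--     for base_term, related in related_terms.items():
--         if base_term in c1_words and any(term in c2_words for term in related):
--             return True
--         if base_term in c2_words and any(term in c1_words for term in related):
--             return True
--
--     return False
-- ===== SOURCE B (Python) =====
-- def _concepts_related(concept1: str, concept2: str) -> bool:
--     """Check if two concepts are semantically related"""
--     c1_words = set(concept1.lower().split())
--     c2_words = set(concept2.lower().split())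
--
--     # Check for common words
--     if c1_words & c2_words:
--         return True
--
--     related_terms = {
--         'force': {'push', 'pull', 'newton', 'dynamics'},
--         'motion': {'movement', 'velocity', 'speed', 'kinematic'},
--         'energy': {'work', 'power', 'kinetic', 'potential'},
--         'light': {'optics', 'ray', 'reflection', 'refraction'},
--         'electricity': {'current', 'voltage', 'circuit', 'charge'},
--         'heat': {'temperature', 'thermal', 'calorie', 'conduction'}
--     }
--
--     # Build a symmetric adjacency graph once: base <-> each related term
--     adjacency = {}
--     for base, related in related_terms.items():
--         adjacency.setdefault(base, set()).update(related)
--         for term in related: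
--             adjacency.setdefault(term, set()).add(base)
--
--     # Related iff some word of concept1 has a graph neighbour among concept2's words
--     return any(adjacency.get(word, set()) & c2_words for word in c1_words)
-- ===== Notes on version B (the rewrite author's own statement) =====
-- stated objective: alternative
-- what changed: Instead of scanning the related_terms table with two directional base-in-c1/base-in-c2 branches per entry, B prebuilds a symmetric adjacency graph (base <-> each related term) once and returns whether any word of concept1 has a graph neighbour among concept2's words.
import Mathlib
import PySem

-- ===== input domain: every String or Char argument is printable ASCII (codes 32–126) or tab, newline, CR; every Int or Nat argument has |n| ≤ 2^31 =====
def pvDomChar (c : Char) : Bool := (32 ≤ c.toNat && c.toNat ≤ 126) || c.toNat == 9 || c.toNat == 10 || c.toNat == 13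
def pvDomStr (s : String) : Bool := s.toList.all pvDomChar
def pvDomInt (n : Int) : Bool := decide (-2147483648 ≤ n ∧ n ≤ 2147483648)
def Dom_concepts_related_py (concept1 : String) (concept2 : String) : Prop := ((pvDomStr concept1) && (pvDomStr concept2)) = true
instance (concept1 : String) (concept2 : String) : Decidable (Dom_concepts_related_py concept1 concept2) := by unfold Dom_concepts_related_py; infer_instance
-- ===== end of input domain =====

-- B rephrases the directional two-branch scan over the relationship table as a lookup in a
-- prebuilt symmetric adjacency graph (objective: alternative data structure, same cost).

-- ===== PORT A =====
-- the related_terms dict (identical literal in A and B), as an assoc list (its sets as distinct-element lists)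
def relatedTerms : List (String × List String) :=
  [("force", ["push", "pull", "newton", "dynamics"]),
   ("motion", ["movement", "velocity", "speed", "kinematic"]),
   ("energy", ["work", "power", "kinetic", "potential"]),
   ("light", ["optics", "ray", "reflection", "refraction"]),
   ("electricity", ["current", "voltage", "circuit", "charge"]),
   ("heat", ["temperature", "thermal", "calorie", "conduction"])]

-- A's 'for base_term, related in related_terms.items():' loop with its two early returns
def loopA (c1 c2 : PySem.Set String) : List (String × List String) → Bool
  | [] => false
  | (base, rel) :: rest =>
    if PySem.Set.contains c1 base && rel.any (fun t => PySem.Set.contains c2 t) then true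
    else if PySem.Set.contains c2 base && rel.any (fun t => PySem.Set.contains c1 t) then true
    else loopA c1 c2 rest

def concepts_related_py (concept1 : String) (concept2 : String) : Bool :=
  let c1_words : PySem.Set String := PySem.Set.ofList (PySem.Str.split₀ (PySem.Str.lower concept1))
  let c2_words : PySem.Set String := PySem.Set.ofList (PySem.Str.split₀ (PySem.Str.lower concept2))
  let common := PySem.Set.inter c1_words c2_words
  if !common.isEmpty then true
  else loopA c1_words c2_words relatedTerms

-- ===== PORT B =====
-- 'adjacency = {}; for base, related in related_terms.items(): setdefault/update + reverse edges'
def buildAdj : PySem.Dict String (PySem.Set String) :=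
  relatedTerms.foldl
    (fun d p =>
      let d := d.insert p.1 (PySem.Set.update (d.getD p.1 PySem.Set.empty) p.2)
      p.2.foldl (fun d t => d.insert t (PySem.Set.add (d.getD t PySem.Set.empty) p.1)) d)
    PySem.Dict.empty

def concepts_related_py_alt (concept1 : String) (concept2 : String) : Bool :=
  let c1_words : PySem.Set String := PySem.Set.ofList (PySem.Str.split₀ (PySem.Str.lower concept1))
  let c2_words : PySem.Set String := PySem.Set.ofList (PySem.Str.split₀ (PySem.Str.lower concept2))
  if !(PySem.Set.inter c1_words c2_words).isEmpty then true
  else c1_words.any (fun w =>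
    !(PySem.Set.inter (PySem.Dict.getD buildAdj w PySem.Set.empty) c2_words).isEmpty)

-- ===== PRECONDITION & SPEC =====
def Spec_concepts_related_py (concept1 : String) (concept2 : String) (out : Bool) : Prop := out = concepts_related_py_alt concept1 concept2
instance (concept1 : String) (concept2 : String) (out : Bool) : Decidable (Spec_concepts_related_py concept1 concept2 out) := by unfold Spec_concepts_related_py; infer_instance

-- ===== CLAIM (what is proved, stated in full; the proofs are below) =====
def Claim_equal_concepts_related_py : Prop := ∀ (concept1 : String) (concept2 : String), Dom_concepts_related_py concept1 concept2 → Spec_concepts_related_py concept1 concept2 (concepts_related_py concept1 concept2)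

-- ===== LEMMAS AND PROOFS =====

def adjKeys : List String :=
  ["force","push","pull","newton","dynamics","motion","movement","velocity","speed","kinematic",
   "energy","work","power","kinetic","potential","light","optics","ray","reflection","refraction",
   "electricity","current","voltage","circuit","charge","heat","temperature","thermal","calorie","conduction"]

theorem buildAdj_eval : buildAdj = PySem.Dict.mk [("force", ["push", "pull", "newton", "dynamics"]), ("push", ["force"]), ("pull", ["force"]), ("newton", ["force"]), ("dynamics", ["force"]), ("motion", ["movement", "velocity", "speed", "kinematic"]), ("movement", ["motion"]), ("velocity", ["motion"]), ("speed", ["motion"]), ("kinematic", ["motion"]), ("energy", ["work", "power", "kinetic", "potential"]), ("work", ["energy"]), ("power", ["energy"]), ("kinetic", ["energy"]), ("potential", ["energy"]), ("light", ["optics", "ray", "reflection", "refraction"]), ("optics", ["light"]), ("ray", ["light"]), ("reflection", ["light"]), ("refraction", ["light"]), ("electricity", ["current", "voltage", "circuit", "charge"]), ("current", ["electricity"]), ("voltage", ["electricity"]), ("circuit", ["electricity"]), ("charge", ["electricity"]), ("heat", ["temperature", "thermal", "calorie", "conduction"]), ("temperature", ["heat"]), ("thermal", ["heat"]), ("calorie",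 ["heat"]), ("conduction", ["heat"])] := by decide

theorem getD_notkey (w : String) (h : ¬ w ∈ adjKeys) :
    PySem.Dict.getD buildAdj w PySem.Set.empty = PySem.Set.empty := by
  simp [adjKeys] at h
  obtain ⟨h1,h2,h3,h4,h5,h6,h7,h8,h9,h10,h11,h12,h13,h14,h15,h16,h17,h18,h19,h20,h21,h22,h23,h24,h25,h26,h27,h28,h29,h30⟩ := h
  have H1 : ("force" == w) = false := beq_eq_false_iff_ne.mpr (fun h => h1 h.symm)
  have H2 : ("push" == w) = false := beq_eq_false_iff_ne.mpr (fun h => h2 h.symm)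
  have H3 : ("pull" == w) = false := beq_eq_false_iff_ne.mpr (fun h => h3 h.symm)
  have H4 : ("newton" == w) = false := beq_eq_false_iff_ne.mpr (fun h => h4 h.symm)
  have H5 : ("dynamics" == w) = false := beq_eq_false_iff_ne.mpr (fun h => h5 h.symm)
  have H6 : ("motion" == w) = false := beq_eq_false_iff_ne.mpr (fun h => h6 h.symm)
  have H7 : ("movement" == w) = false := beq_eq_false_iff_ne.mpr (fun h => h7 h.symm)
  have H8 : ("velocity" == w) = false := beq_eq_false_iff_ne.mpr (fun h => h8 h.symm)
  have H9 : ("speed" == w) = false := beq_eq_false_iff_ne.mpr (fun h => h9 h.symm)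
  have H10 : ("kinematic" == w) = false := beq_eq_false_iff_ne.mpr (fun h => h10 h.symm)
  have H11 : ("energy" == w) = false := beq_eq_false_iff_ne.mpr (fun h => h11 h.symm)
  have H12 : ("work" == w) = false := beq_eq_false_iff_ne.mpr (fun h => h12 h.symm)
  have H13 : ("power" == w) = false := beq_eq_false_iff_ne.mpr (fun h => h13 h.symm)
  have H14 : ("kinetic" == w) = false := beq_eq_false_iff_ne.mpr (fun h => h14 h.symm)
  have H15 : ("potential" == w) = false := beq_eq_false_iff_ne.mpr (fun h => h15 h.symm)
  have H16 : ("light" == w) = false := beq_eq_false_iff_ne.mpr (fun h => h16 h.symm)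
  have H17 : ("optics" == w) = false := beq_eq_false_iff_ne.mpr (fun h => h17 h.symm)
  have H18 : ("ray" == w) = false := beq_eq_false_iff_ne.mpr (fun h => h18 h.symm)
  have H19 : ("reflection" == w) = false := beq_eq_false_iff_ne.mpr (fun h => h19 h.symm)
  have H20 : ("refraction" == w) = false := beq_eq_false_iff_ne.mpr (fun h => h20 h.symm)
  have H21 : ("electricity" == w) = false := beq_eq_false_iff_ne.mpr (fun h => h21 h.symm)
  have H22 : ("current" == w) = false := beq_eq_false_iff_ne.mpr (fun h => h22 h.symm)
  have H23 : ("voltage" == w) = false := beq_eq_false_iff_ne.mpr (fun h => h23 h.symm)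
  have H24 : ("circuit" == w) = false := beq_eq_false_iff_ne.mpr (fun h => h24 h.symm)
  have H25 : ("charge" == w) = false := beq_eq_false_iff_ne.mpr (fun h => h25 h.symm)
  have H26 : ("heat" == w) = false := beq_eq_false_iff_ne.mpr (fun h => h26 h.symm)
  have H27 : ("temperature" == w) = false := beq_eq_false_iff_ne.mpr (fun h => h27 h.symm)
  have H28 : ("thermal" == w) = false := beq_eq_false_iff_ne.mpr (fun h => h28 h.symm)
  have H29 : ("calorie" == w) = false := beq_eq_false_iff_ne.mpr (fun h => h29 h.symm)
  have H30 : ("conduction" == w) = false := beq_eq_false_iff_ne.mpr (fun h => h30 h.symm)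
  rw [buildAdj_eval]
  simp [PySem.Dict.getD_eq_get?_getD, PySem.Dict.get?, List.find?, H1,H2,H3,H4,H5,H6,H7,H8,H9,H10,H11,H12,H13,H14,H15,H16,H17,H18,H19,H20,H21,H22,H23,H24,H25,H26,H27,H28,H29,H30]

theorem any_eq_keys (xs K : List String) (f : String → Bool) (h : ∀ w, f w = true → w ∈ K) :
    xs.any f = K.any (fun k => xs.contains k && f k) := by
  rw [Bool.eq_iff_iff]
  simp only [List.any_eq_true, Bool.and_eq_true, List.contains_eq_mem, decide_eq_true_eq]
  constructor
  · rintro ⟨w, hw, hf⟩; exact ⟨w, h w hf, hw, hf⟩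
  · rintro ⟨k, _, hk, hf⟩; exact ⟨k, hk, hf⟩

theorem ite_true_or (a b : Bool) : (if a = true then true else b) = (a || b) := by cases a <;> simp

theorem swap4 : ∀ (b p1 p2 p3 p4 x : Bool),
    (b && (p1 || (p2 || (p3 || (p4 || false)))) || x)
      = (p1 && b || (p2 && b || (p3 && b || (p4 && b || x)))) := by decide

theorem swap1 : ∀ (b p x : Bool), (b && (p || false) || x) = (b && p || x) := by decide

theorem not_isEmpty_filter {α} (p : α → Bool) (s : List α) : (!(s.filter p).isEmpty) = s.any p := by
  induction s with
  | nil => simp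
  | cons a t ih => cases h : p a <;> simp [h, ← ih]

set_option maxHeartbeats 1000000 in
theorem main_lemma (c1 c2 : List String) :
    loopA c1 c2 relatedTerms
      = c1.any (fun w =>
          !(PySem.Set.inter (PySem.Dict.getD buildAdj w PySem.Set.empty) c2).isEmpty) := by
  rw [any_eq_keys c1 adjKeys _ (by
    intro w hf
    by_contra hw
    rw [getD_notkey w hw] at hf
    simp [PySem.Set.inter, PySem.Set.empty] at hf)]
  simp only [loopA, relatedTerms, adjKeys, List.any_cons, List.any_nil, ite_true_or,
    buildAdj_eval, PySem.Dict.getD_eq_get?_getD, PySem.Dict.get?, List.find?,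
    PySem.Set.inter, PySem.Set.contains, PySem.Set.empty]
  simp only [String.reduceBEq, beq_self_eq_true, Option.map, Option.getD, not_isEmpty_filter,
    List.any_cons, List.any_nil]
  simp only [swap4, swap1]

-- ===== VERDICT (by name: the statement is the Claim_ definition above) =====
theorem concepts_related_py_spec : Claim_equal_concepts_related_py := by
  intro c1 c2 _
  unfold Spec_concepts_related_py concepts_related_py concepts_related_py_alt
  simp only []
  split
  · rfl
  · exact main_lemma _ _
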